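-- pv_equiv track=rewrite | github.com/michalholes/audiomason2 | scripts/am_patch_web/queue.py | _inject_web_overrides
-- ===== SOURCE A (Python) =====
-- def _inject_web_overrides(argv: list[str], job_id: str) -> list[str]:
--     """Return argv with web-required runner overrides injected.
--
--     Web requires runner NDJSON output (json_out=true) and a job-local json dir
--     (patch_layout_json_dir=artifacts/web_jobs/<job_id>).
--
--     This function is deterministic and idempotent.
--     """
--
--     out = list(argv)
--
--     # Find the runner script path (usually scripts/am_patch.py).
--     script_idx = -1
--     for i, a in enumerate(out):
--         if a.endswith("am_patch.py"):
--             script_idx = i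
--             break
--
--     # If script is not found, append overrides at the end.
--     insert_at = script_idx + 1 if script_idx >= 0 else len(out)
--
--     def _has_override(key: str) -> bool:
--         for j in range(len(out) - 1):
--             if out[j] == "--override" and out[j + 1].startswith(key + "="):
--                 return True
--         return False
--
--     overrides: list[str] = []
--     if not _has_override("json_out"):
--         overrides.extend(["--override", "json_out=true"])
--     if not _has_override("patch_layout_json_dir"):
--         overrides.extend(
--             [
--                 "--override",
--                 "patch_layout_json_dir=artifacts/web_jobs/" + job_id,
--             ]
--         )
--
--     if overrides:
--         out[insert_at:insert_at] = overrides
--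
--     return out
-- ===== SOURCE B (Python) =====
-- def _inject_web_overrides(argv: list[str], job_id: str) -> list[str]:
--     """Return argv with web-required runner overrides injected.
--
--     Single fused pass: one state machine over argv simultaneously records the
--     first runner-script index and whether each override key already follows a
--     '--override' token; then the missing overrides are spliced in by
--     concatenation.
--     """
--     script_idx = None
--     has_json = False
--     has_dir = False
--     prev_is_override = False
--     for i, tok in enumerate(argv):
--         if script_idx is None and tok.endswith("am_patch.py"):
--             script_idx = i
--         if prev_is_override:
--             has_json = has_json or tok.startswith("json_out=")
--             has_dir = has_dir or tok.startswith("patch_layout_json_dir=")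
--         prev_is_override = tok == "--override"
--     insert_at = len(argv) if script_idx is None else script_idx + 1
--     overrides = []
--     if not has_json:
--         overrides += ["--override", "json_out=true"]
--     if not has_dir:
--         overrides += ["--override", "patch_layout_json_dir=artifacts/web_jobs/" + job_id]
--     return argv[:insert_at] + overrides + argv[insert_at:]
-- ===== Notes on version B (the rewrite author's own statement) =====
-- stated objective: alternative
-- what changed: A makes three separate scans over argv (a break-on-first script search plus two key-specific pair scans via _has_override) and splices with slice assignment; B makes one fused state-machine pass that simultaneously records the first script index and both already-present override flags, then builds the result by concatenation.
import Mathlib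
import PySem

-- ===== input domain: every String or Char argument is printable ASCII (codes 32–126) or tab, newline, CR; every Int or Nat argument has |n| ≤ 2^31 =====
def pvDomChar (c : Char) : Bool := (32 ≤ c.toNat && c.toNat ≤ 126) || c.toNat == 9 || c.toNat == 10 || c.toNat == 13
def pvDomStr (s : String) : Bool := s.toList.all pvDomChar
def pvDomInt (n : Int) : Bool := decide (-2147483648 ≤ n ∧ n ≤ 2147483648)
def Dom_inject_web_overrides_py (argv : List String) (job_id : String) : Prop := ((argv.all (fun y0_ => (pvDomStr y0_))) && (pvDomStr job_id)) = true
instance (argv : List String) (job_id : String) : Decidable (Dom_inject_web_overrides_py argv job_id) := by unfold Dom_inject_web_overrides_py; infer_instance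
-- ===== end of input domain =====

-- B replaces A's three separate scans (script search + two key-specific pair scans)
-- by a single fused state-machine pass; objective: simpler/alternative, equal return value.

-- ===== PORT A =====

-- the 'for i, a in enumerate(out): if a.endswith(...): script_idx = i; break' loop
def pvFindScriptA : List String → Int → Int
  | [], _ => -1
  | a :: rest, i => if PySem.Str.endswith a "am_patch.py" then i else pvFindScriptA rest (i + 1)

-- '_has_override(key)': the 'for j in range(len(out)-1)' pair scan with early return
def pvHasOverrideA (key : String) : List String → Bool
  | a :: b :: rest =>
      (a == "--override" && PySem.Str.startswith b (key ++ "=")) || pvHasOverrideA key (b :: rest)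
  | _ => false

def inject_web_overrides_py (argv : List String) (job_id : String) : List String :=
  let out := argv
  let script_idx := pvFindScriptA out 0
  let insert_at : Int := if script_idx ≥ 0 then script_idx + 1 else (out.length : Int)
  let overrides :=
    (if !pvHasOverrideA "json_out" out then ["--override", "json_out=true"] else []) ++
    (if !pvHasOverrideA "patch_layout_json_dir" out then
        ["--override", "patch_layout_json_dir=artifacts/web_jobs/" ++ job_id] else [])
  if overrides.isEmpty then out
  else
    -- out[insert_at:insert_at] = overrides; insert_at is nonnegative and ≤ len here,
    -- where Python's slice assignment is exactly this splice
    out.take insert_at.toNat ++ overrides ++ out.drop insert_at.toNat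

-- ===== PORT B =====

-- fused loop state: (script_idx, has_json, has_dir); prev_is_override threads through
def pvLoopB : List String → Int → Option Int → Bool → Bool → Bool → Option Int × Bool × Bool
  | [], _, si, hj, hd, _ => (si, hj, hd)
  | tok :: rest, i, si, hj, hd, prev =>
      let si' := if si.isNone && PySem.Str.endswith tok "am_patch.py" then some i else si
      let hj' := if prev then hj || PySem.Str.startswith tok "json_out=" else hj
      let hd' := if prev then hd || PySem.Str.startswith tok "patch_layout_json_dir=" else hd
      pvLoopB rest (i + 1) si' hj' hd' (tok == "--override")

def inject_web_overrides_py_alt (argv : List String) (job_id : String) : List String :=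
  let st := pvLoopB argv 0 none false false false
  let insert_at : Int := match st.1 with
    | none => (argv.length : Int)
    | some k => k + 1
  let overrides :=
    (if !st.2.1 then ["--override", "json_out=true"] else []) ++
    (if !st.2.2 then ["--override", "patch_layout_json_dir=artifacts/web_jobs/" ++ job_id] else [])
  PySem.List.slice argv none (some insert_at) ++ overrides ++
    PySem.List.slice argv (some insert_at) none

-- ===== PRECONDITION & SPEC =====
def Spec_inject_web_overrides_py (argv : List String) (job_id : String) (out : List String) : Prop := out = inject_web_overrides_py_alt argv job_id
instance (argv : List String) (job_id : String) (out : List String) : Decidable (Spec_inject_web_overrides_py argv job_id out) := by unfold Spec_inject_web_overrides_py; infer_instance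

-- ===== CLAIM (what is proved, stated in full; the proofs are below) =====
def Claim_equal_inject_web_overrides_py : Prop := ∀ (argv : List String) (job_id : String), Dom_inject_web_overrides_py argv job_id → Spec_inject_web_overrides_py argv job_id (inject_web_overrides_py argv job_id)

-- ===== LEMMAS AND PROOFS =====

-- B's pair check with an incoming prev flag, as its own recursion (proof helper)
def pvHasP (key : String) : Bool → List String → Bool
  | _, [] => false
  | prev, b :: rest => (prev && PySem.Str.startswith b (key ++ "=")) || pvHasP key (b == "--override") rest

-- A's script search as an Option (proof helper)
def pvOptFind : List String → Int → Option Int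
  | [], _ => none
  | a :: rest, i => if PySem.Str.endswith a "am_patch.py" then some i else pvOptFind rest (i + 1)

lemma pvHasP_cons_eq (key : String) (a : String) (l : List String) :
    pvHasP key (a == "--override") l = pvHasOverrideA key (a :: l) := by
  induction l generalizing a with
  | nil => simp [pvHasP, pvHasOverrideA]
  | cons b rest ih =>
      simp [pvHasP, pvHasOverrideA, ← ih b]

lemma pvHasP_false_eq (key : String) (l : List String) :
    pvHasP key false l = pvHasOverrideA key l := by
  cases l with
  | nil => rfl
  | cons a rest => simp [pvHasP, pvHasP_cons_eq key a rest]

lemma pvFindScriptA_eq_optFind (l : List String) (i : Int) :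
    pvFindScriptA l i = (pvOptFind l i).getD (-1) := by
  induction l generalizing i with
  | nil => rfl
  | cons a rest ih =>
      simp only [pvFindScriptA, pvOptFind]
      split <;> simp [ih]

lemma pvOptFind_ge (l : List String) (i k : Int) (h : pvOptFind l i = some k) : i ≤ k := by
  induction l generalizing i with
  | nil => simp [pvOptFind] at h
  | cons a rest ih =>
      simp only [pvOptFind] at h
      split at h
      · simp_all
      · have := ih (i + 1) h; omega

lemma pvLoopB_eq (l : List String) (i : Int) (si : Option Int) (hj hd prev : Bool) :
    pvLoopB l i si hj hd prev =
      (si.orElse (fun _ => pvOptFind l i),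
       hj || pvHasP "json_out" prev l,
       hd || pvHasP "patch_layout_json_dir" prev l) := by
  induction l generalizing i si hj hd prev with
  | nil => simp [pvLoopB, pvHasP, pvOptFind]
  | cons tok rest ih =>
      simp only [pvLoopB, pvHasP, pvOptFind, ih]
      cases si with
      | none =>
          cases prev <;> simp [Option.orElse, Bool.or_assoc] <;> split <;> simp_all
      | some k =>
          cases prev <;> simp [Option.orElse, Bool.or_assoc]

-- ===== VERDICT (by name: the statement is the Claim_ definition above) =====
theorem inject_web_overrides_py_spec : Claim_equal_inject_web_overrides_py := by
  intro argv job_id _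
  show inject_web_overrides_py argv job_id = inject_web_overrides_py_alt argv job_id
  unfold inject_web_overrides_py inject_web_overrides_py_alt
  rw [pvLoopB_eq]
  simp only [Option.orElse, pvHasP_false_eq, pvFindScriptA_eq_optFind, Bool.false_or]
  have hins : (if (pvOptFind argv 0).getD (-1) ≥ 0 then (pvOptFind argv 0).getD (-1) + 1
      else (argv.length : Int)) =
      (match pvOptFind argv 0 with
        | none => (argv.length : Int)
        | some k => k + 1) := by
    cases h : pvOptFind argv 0 with
    | none => simp
    | some k =>
        have := pvOptFind_ge argv 0 k h
        simp [this]
  rw [hins]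
  set io : Int := (match pvOptFind argv 0 with
        | none => (argv.length : Int)
        | some k => k + 1) with hio
  have hio0 : 0 ≤ io := by
    rw [hio]
    cases h : pvOptFind argv 0 with
    | none => simp
    | some k => have := pvOptFind_ge argv 0 k h; simp; omega
  rw [PySem.List.slice_to argv hio0, PySem.List.slice_from argv hio0]
  set ov := (if !pvHasOverrideA "json_out" argv then ["--override", "json_out=true"] else []) ++
    (if !pvHasOverrideA "patch_layout_json_dir" argv then
        ["--override", "patch_layout_json_dir=artifacts/web_jobs/" ++ job_id] else []) with hov
  by_cases hemp : ov.isEmpty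
  · rw [List.isEmpty_iff] at hemp
    simp [hemp]
  · simp [hemp]
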